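-- pv_equiv track=rewrite | github.com/NoHaxUS/rochasistemas | bet_bola/updater/get_markets.py | get_translated_cotation_with_header_name_special
-- ===== SOURCE A (Python) =====
-- def get_translated_cotation_with_header_name_special(cotation_name):
--     TRANSLATE_TABLE = {
--         'Home': 'Casa',
--         'Away': 'Fora',
--         'To Win to Nil':'Ganhar sem tomar Gol',
--         'To Win Either Half': 'Ganhar Qualquer Etapa',
--         'To Win Both Halves': 'Ganhar Ambas Etapas',
--         'To Score in Both Halves': 'Marcar em Ambas Etapas'
--     }
--
--     cotation_translated = cotation_name.strip()
--     for header in TRANSLATE_TABLE.keys():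
--         cotation_translated = cotation_translated.replace(header, TRANSLATE_TABLE.get(header, header))
--     return cotation_translated
-- ===== SOURCE B (Python) =====
-- def get_translated_cotation_with_header_name_special(cotation_name):
--     TABLE = [
--         ('Home', 'Casa'),
--         ('Away', 'Fora'),
--         ('To Win to Nil', 'Ganhar sem tomar Gol'),
--         ('To Win Either Half', 'Ganhar Qualquer Etapa'),
--         ('To Win Both Halves', 'Ganhar Ambas Etapas'),
--         ('To Score in Both Halves', 'Marcar em Ambas Etapas'),
--     ]
--     s = cotation_name.strip()
--     out = []
--     i = 0
--     n = len(s)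
--     while i < n:
--         for key, val in TABLE:
--             if s.startswith(key, i):
--                 out.append(val)
--                 i += len(key)
--                 break
--         else:
--             out.append(s[i])
--             i += 1
--     return ''.join(out)
-- ===== Notes on version B (the rewrite author's own statement) =====
-- stated objective: alternative
-- what changed: A makes six sequential full-string .replace passes (one per table key); B strips once and does a single left-to-right scan that at each position emits the translation of the first matching key (or the character), building the output in one pass.
import Mathlib
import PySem

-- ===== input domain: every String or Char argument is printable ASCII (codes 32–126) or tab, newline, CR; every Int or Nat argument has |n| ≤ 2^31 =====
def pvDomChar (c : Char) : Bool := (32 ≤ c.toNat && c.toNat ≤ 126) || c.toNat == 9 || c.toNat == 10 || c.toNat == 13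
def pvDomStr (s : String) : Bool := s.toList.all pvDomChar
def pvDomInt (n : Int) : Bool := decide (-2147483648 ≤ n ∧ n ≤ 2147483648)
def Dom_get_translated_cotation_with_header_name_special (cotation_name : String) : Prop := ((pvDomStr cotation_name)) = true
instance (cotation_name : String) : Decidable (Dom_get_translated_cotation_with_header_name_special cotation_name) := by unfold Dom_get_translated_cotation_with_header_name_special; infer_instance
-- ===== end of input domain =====

-- B replaces A's six sequential full-string replace passes by a single left-to-right scan that
-- emits the translation of the first table key matching at each position (alternative algorithm, same result).


-- ===== PORT A =====
-- the dict literal TRANSLATE_TABLE of A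
def pvTranslateTable : PySem.Dict String String :=
  PySem.Dict.ofList
    [("Home", "Casa"),
     ("Away", "Fora"),
     ("To Win to Nil", "Ganhar sem tomar Gol"),
     ("To Win Either Half", "Ganhar Qualquer Etapa"),
     ("To Win Both Halves", "Ganhar Ambas Etapas"),
     ("To Score in Both Halves", "Marcar em Ambas Etapas")]

def get_translated_cotation_with_header_name_special (cotation_name : String) : String :=
  pvTranslateTable.keys.foldl
    (fun cotation_translated header =>
      PySem.Str.replace cotation_translated header (pvTranslateTable.getD header header))
    (PySem.Str.strip cotation_name)

-- ===== PORT B =====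
-- B's table of (key, value) pairs, as char lists
def pvTableB : List (List Char × List Char) :=
  [("Home".toList, "Casa".toList),
   ("Away".toList, "Fora".toList),
   ("To Win to Nil".toList, "Ganhar sem tomar Gol".toList),
   ("To Win Either Half".toList, "Ganhar Qualquer Etapa".toList),
   ("To Win Both Halves".toList, "Ganhar Ambas Etapas".toList),
   ("To Score in Both Halves".toList, "Marcar em Ambas Etapas".toList)]

-- Source B's inner `for key, val in TABLE: if s.startswith(key, i): … break / else:` loop
def pvFirstMatch (tbl : List (List Char × List Char)) (l : List Char) : Option (List Char × List Char) :=
  tbl.find? (fun p => p.1.isPrefixOf l)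

-- Source B's while loop over positions, as the obvious structural recursion on the remaining characters
def pvScan (tbl : List (List Char × List Char)) : List Char → List Char
  | [] => []
  | c :: t =>
    match pvFirstMatch tbl (c :: t) with
    | some kv => kv.2 ++ pvScan tbl (t.drop (kv.1.length - 1))
    | none => c :: pvScan tbl t
termination_by l => l.length
decreasing_by
  · simp only [List.length_cons, List.length_drop]; omega
  · simp only [List.length_cons]; omega

def get_translated_cotation_with_header_name_special_alt (cotation_name : String) : String :=
  String.ofList (pvScan pvTableB (PySem.Chars.strip cotation_name.toList))

-- ===== PRECONDITION & SPEC =====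
def Spec_get_translated_cotation_with_header_name_special (cotation_name : String) (out : String) : Prop := out = get_translated_cotation_with_header_name_special_alt cotation_name
instance (cotation_name : String) (out : String) : Decidable (Spec_get_translated_cotation_with_header_name_special cotation_name out) := by unfold Spec_get_translated_cotation_with_header_name_special; infer_instance

-- ===== CLAIM (what is proved, stated in full; the proofs are below) =====
def Claim_equal_get_translated_cotation_with_header_name_special : Prop := ∀ (cotation_name : String), Dom_get_translated_cotation_with_header_name_special cotation_name → Spec_get_translated_cotation_with_header_name_special cotation_name (get_translated_cotation_with_header_name_special cotation_name)

-- ===== LEMMAS AND PROOFS =====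

-- clean structural form of one CPython str.replace pass (= PySem.Chars.replace for a nonempty key)
def pvCrep (k v : List Char) : List Char → List Char
  | [] => []
  | c :: t =>
    if k.isPrefixOf (c :: t) then v ++ pvCrep k v (t.drop (k.length - 1)) else c :: pvCrep k v t
termination_by l => l.length
decreasing_by
  · simp only [List.length_cons, List.length_drop]; omega
  · simp only [List.length_cons]; omega

-- "no occurrence of b can start inside a": every nonempty suffix of a neither extends into b nor contains b
def pvP (a b : List Char) : Prop := ∀ u, u <:+ a → u ≠ [] → ¬ u <+: b ∧ ¬ b <+: u

def pvNoOcc (a b : List Char) : Bool :=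
  a.tails.all (fun u => u.isEmpty || (!u.isPrefixOf b && !b.isPrefixOf u))

-- decidable package of all side conditions pvStep needs about key k, value v and the remaining table
def pvStepOK (k v : List Char) (tbl : List (List Char × List Char)) : Bool :=
  (!k.isEmpty) &&
  tbl.all (fun p => !p.1.isEmpty && pvNoOcc p.1 k && pvNoOcc p.1 v && pvNoOcc v p.1) &&
  tbl.all (fun p => tbl.all (fun q =>
    (p.1 == q.1 || (!p.1.isPrefixOf q.1 && !q.1.isPrefixOf p.1)) && (!(p.1 == q.1) || p == q)))

lemma pvNoOcc_spec (a b : List Char) (h : pvNoOcc a b = true) : pvP a b := by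
  intro u hu hne
  have hall := List.all_eq_true.mp h u ((List.mem_tails u a).mpr hu)
  rw [Bool.or_eq_true] at hall
  rcases hall with he | hpp
  · exact absurd (List.isEmpty_iff.mp he) hne
  · rw [Bool.and_eq_true, Bool.not_eq_true', Bool.not_eq_true'] at hpp
    exact ⟨fun hc => by simp [List.isPrefixOf_iff_prefix.mpr hc] at hpp,
           fun hc => by simp [List.isPrefixOf_iff_prefix.mpr hc] at hpp⟩

lemma pvP_of_suffix {a' a b : List Char} (hs : a' <:+ a) (h : pvP a b) : pvP a' b :=
  fun u hu hne => h u (hu.trans hs) hne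

lemma pvNotPrefixAppend {w b : List Char} (x : List Char) (hw : w ≠ []) (hP : pvP w b) :
    ¬ b <+: w ++ x := by
  intro hpre
  rcases List.prefix_or_prefix_of_prefix hpre (List.prefix_append w x) with h | h
  · exact (hP w List.suffix_rfl hw).2 h
  · exact (hP w List.suffix_rfl hw).1 h

lemma pvCrep_nil (k v : List Char) : pvCrep k v [] = [] := by simp [pvCrep]

lemma pvCrep_neg {k : List Char} (v : List Char) {c : Char} {t : List Char}
    (h : ¬ k <+: (c :: t)) : pvCrep k v (c :: t) = c :: pvCrep k v t := by
  rw [pvCrep, if_neg (by simpa [List.isPrefixOf_iff_prefix] using h)]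

lemma pvCrep_pos {k : List Char} (v : List Char) {l : List Char} (hk : k ≠ [])
    (h : k <+: l) : pvCrep k v l = v ++ pvCrep k v (l.drop k.length) := by
  cases l with
  | nil => simp [List.prefix_nil] at h; exact absurd h hk
  | cons c t =>
    rw [pvCrep, if_pos (List.isPrefixOf_iff_prefix.mpr h)]
    obtain ⟨m, hm⟩ : ∃ m, k.length = m + 1 := ⟨k.length - 1, by cases k <;> simp_all⟩
    rw [hm]; simp [List.drop_succ_cons]

lemma pvCrep_append {k : List Char} (v : List Char) {w : List Char} (x : List Char)
    (hP : pvP w k) : pvCrep k v (w ++ x) = w ++ pvCrep k v x := by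
  induction w with
  | nil => rfl
  | cons c w' ih =>
    have hnp : ¬ k <+: c :: (w' ++ x) := pvNotPrefixAppend (w := c :: w') x (by simp) hP
    rw [List.cons_append, pvCrep_neg v hnp]
    rw [ih (pvP_of_suffix (List.suffix_cons c w') hP)]
    rfl

lemma pvCrep_no_new_prefix {k : List Char} (v : List Char) (hk : k ≠ []) :
    ∀ (t u : List Char), u ≠ [] → pvP u v → ¬ u <+: t → ¬ u <+: pvCrep k v t := by
  suffices H : ∀ n (t u : List Char), t.length ≤ n → u ≠ [] → pvP u v → ¬ u <+: t → ¬ u <+: pvCrep k v t by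
    exact fun t u => H t.length t u le_rfl
  intro n
  induction n with
  | zero =>
    intro t u ht hu _ _
    have : t = [] := List.eq_nil_of_length_eq_zero (by omega)
    subst this
    rw [pvCrep_nil]
    simpa [List.prefix_nil] using hu
  | succ n ih =>
    intro t u ht hu hPuv hnp
    cases t with
    | nil =>
      rw [pvCrep_nil]; simpa [List.prefix_nil] using hu
    | cons c t' =>
      by_cases hkp : k <+: (c :: t')
      · rw [pvCrep_pos v hk hkp]
        intro hpre
        rcases List.prefix_or_prefix_of_prefix hpre (List.prefix_append v _) with h | h
        · exact (hPuv u List.suffix_rfl hu).1 h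
        · exact (hPuv u List.suffix_rfl hu).2 h
      · rw [pvCrep_neg v hkp]
        intro hpre
        cases u with
        | nil => exact hu rfl
        | cons d u' =>
          obtain ⟨hdc, hu'⟩ := List.cons_prefix_cons.mp hpre
          subst hdc
          by_cases hu'e : u' = []
          · subst hu'e
            exact hnp (List.cons_prefix_cons.mpr ⟨rfl, List.nil_prefix⟩)
          · have hnt : ¬ u' <+: t' := fun hcon => hnp (List.cons_prefix_cons.mpr ⟨rfl, hcon⟩)
            exact ih t' u' (by simpa using Nat.lt_succ_iff.mp (by simpa using ht))
              hu'e (pvP_of_suffix (List.suffix_cons _ u') hPuv) hnt hu'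

lemma pvFind?_first {α : Type} (p : α → Bool) :
    ∀ (l : List α) (a : α), a ∈ l → p a = true → (∀ b ∈ l, p b = true → b = a) →
      l.find? p = some a := by
  intro l
  induction l with
  | nil => intro a ha _ _; simp at ha
  | cons x l' ih =>
    intro a ha hpa huniq
    by_cases hx : p x = true
    · rw [List.find?_cons_of_pos hx, huniq x List.mem_cons_self hx]
    · rw [List.find?_cons_of_neg (by simpa using hx)]
      have hax : a ≠ x := fun h => hx (h ▸ hpa)
      exact ih a (by rcases List.mem_cons.mp ha with h | h; exact absurd h hax; exact h) hpa
        (fun b hb hpb => huniq b (List.mem_cons_of_mem x hb) hpb)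

lemma pvScan_nil (tbl : List (List Char × List Char)) : pvScan tbl [] = [] := by simp [pvScan]

lemma pvScan_cons_none {tbl : List (List Char × List Char)} {c : Char} {t : List Char}
    (h : pvFirstMatch tbl (c :: t) = none) : pvScan tbl (c :: t) = c :: pvScan tbl t := by
  rw [pvScan, h]

lemma pvScan_cons_some {tbl : List (List Char × List Char)} {l kj vj : List Char}
    (h : pvFirstMatch tbl l = some (kj, vj)) (hl : l ≠ []) (hkj : kj ≠ []) :
    pvScan tbl l = vj ++ pvScan tbl (l.drop kj.length) := by
  cases l with
  | nil => exact absurd rfl hl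
  | cons c t =>
    rw [pvScan, h]
    obtain ⟨m, hm⟩ : ∃ m, kj.length = m + 1 := ⟨kj.length - 1, by cases kj <;> simp_all⟩
    simp [hm, List.drop_succ_cons]

lemma pvScan_nil_tbl (l : List Char) : pvScan [] l = l := by
  induction l with
  | nil => exact pvScan_nil []
  | cons c t ih => rw [pvScan_cons_none (by rfl), ih]

lemma pvScan_append {tbl : List (List Char × List Char)} {w : List Char} (x : List Char)
    (hQ : ∀ p ∈ tbl, pvP w p.1) : pvScan tbl (w ++ x) = w ++ pvScan tbl x := by
  induction w with
  | nil => rfl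
  | cons c w' ih =>
    have hnone : pvFirstMatch tbl (c :: (w' ++ x)) = none := by
      rw [pvFirstMatch, List.find?_eq_none]
      intro p hp
      have hnp : ¬ p.1 <+: c :: (w' ++ x) :=
        pvNotPrefixAppend (w := c :: w') x (by simp) (hQ p hp)
      simpa [List.isPrefixOf_iff_prefix] using hnp
    rw [List.cons_append, pvScan_cons_none hnone]
    rw [ih (fun p hp => pvP_of_suffix (List.suffix_cons c w') (hQ p hp))]
    rfl

theorem pvStep (k v : List Char) (tbl : List (List Char × List Char))
    (hok : pvStepOK k v tbl = true) :
    ∀ l, pvScan ((k, v) :: tbl) l = pvScan tbl (pvCrep k v l) := by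
  -- unpack the decidable side conditions
  unfold pvStepOK at hok
  rw [Bool.and_eq_true, Bool.and_eq_true] at hok
  obtain ⟨⟨hk0, hA⟩, hPW⟩ := hok
  have hk : k ≠ [] := by simpa using hk0
  rw [List.all_eq_true] at hA
  rw [List.all_eq_true] at hPW
  have hne : ∀ p ∈ tbl, p.1 ≠ [] := by
    intro p hp
    have := hA p hp; simp only [Bool.and_eq_true] at this
    simpa using this.1.1.1
  have h2 : ∀ p ∈ tbl, pvP p.1 k := by
    intro p hp
    have := hA p hp; simp only [Bool.and_eq_true] at this
    exact pvNoOcc_spec _ _ this.1.1.2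
  have h3 : ∀ p ∈ tbl, pvP p.1 v := by
    intro p hp
    have := hA p hp; simp only [Bool.and_eq_true] at this
    exact pvNoOcc_spec _ _ this.1.2
  have h4 : ∀ p ∈ tbl, pvP v p.1 := by
    intro p hp
    have := hA p hp; simp only [Bool.and_eq_true] at this
    exact pvNoOcc_spec _ _ this.2
  have h56 : ∀ p ∈ tbl, ∀ q ∈ tbl,
      (p.1 ≠ q.1 → ¬ p.1 <+: q.1 ∧ ¬ q.1 <+: p.1) ∧ (p.1 = q.1 → p = q) := by
    intro p hp q hq
    have := List.all_eq_true.mp (hPW p hp) q hq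
    rw [Bool.and_eq_true, Bool.or_eq_true, Bool.or_eq_true] at this
    constructor
    · intro hne'
      rcases this.1 with h | h
      · exact absurd (by simpa using h) hne'
      · rw [Bool.and_eq_true, Bool.not_eq_true', Bool.not_eq_true'] at h
        exact ⟨fun hc => by simp [List.isPrefixOf_iff_prefix.mpr hc] at h,
               fun hc => by simp [List.isPrefixOf_iff_prefix.mpr hc] at h⟩
    · intro heq
      rcases this.2 with h | h
      · simp [heq] at h
      · simpa using h
  -- main strong induction on the length of l
  suffices H : ∀ n l, l.length ≤ n → pvScan ((k, v) :: tbl) l = pvScan tbl (pvCrep k v l) by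
    exact fun l => H l.length l le_rfl
  intro n
  induction n with
  | zero =>
    intro l hl
    have : l = [] := List.eq_nil_of_length_eq_zero (by omega)
    subst this
    rw [pvCrep_nil, pvScan_nil, pvScan_nil]
  | succ n ih =>
    intro l hl
    cases l with
    | nil => rw [pvCrep_nil, pvScan_nil, pvScan_nil]
    | cons c t =>
      by_cases hkp : k <+: (c :: t)
      · -- the new key k matches at the front
        have hfm : pvFirstMatch ((k, v) :: tbl) (c :: t) = some (k, v) := by
          rw [pvFirstMatch, List.find?_cons_of_pos (by simpa [List.isPrefixOf_iff_prefix] using hkp)]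
        rw [pvScan_cons_some hfm (by simp) hk]
        rw [pvCrep_pos v hk hkp]
        rw [pvScan_append _ h4]
        rw [ih ((c :: t).drop k.length)
          (by have hk1 : 0 < k.length := List.length_pos_iff.mpr hk
              simp only [List.length_drop, List.length_cons] at hl ⊢; omega)]
      · -- k does not match at the front
        have hfm1 : pvFirstMatch ((k, v) :: tbl) (c :: t) = pvFirstMatch tbl (c :: t) := by
          rw [pvFirstMatch, pvFirstMatch,
            List.find?_cons_of_neg (by simpa [List.isPrefixOf_iff_prefix] using hkp)]
        rcases hfm : pvFirstMatch tbl (c :: t) with _ | ⟨kj, vj⟩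
        · -- no key matches at the front
          have hnomatch : ∀ p ∈ tbl, ¬ p.1 <+: (c :: t) := by
            intro p hp
            have := List.find?_eq_none.mp hfm p hp
            simpa [List.isPrefixOf_iff_prefix] using this
          rw [pvScan_cons_none (by rw [hfm1]; exact hfm)]
          rw [pvCrep_neg v hkp]
          have hnone2 : pvFirstMatch tbl (c :: pvCrep k v t) = none := by
            rw [pvFirstMatch, List.find?_eq_none]
            intro p hp
            suffices hns : ¬ p.1 <+: c :: pvCrep k v t by
              simpa [List.isPrefixOf_iff_prefix] using hns
            intro hpre
            rcases hq : p.1 with _ | ⟨d, u'⟩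
            · exact hne p hp hq
            · rw [hq] at hpre
              obtain ⟨hdc, hu'⟩ := List.cons_prefix_cons.mp hpre
              subst hdc
              by_cases hu'e : u' = []
              · subst hu'e
                exact hnomatch p hp (by rw [hq]; exact List.cons_prefix_cons.mpr ⟨rfl, List.nil_prefix⟩)
              · have hnt : ¬ u' <+: t := fun hcon =>
                  hnomatch p hp (by rw [hq]; exact List.cons_prefix_cons.mpr ⟨rfl, hcon⟩)
                exact pvCrep_no_new_prefix v hk t u' hu'e
                  (pvP_of_suffix (by rw [hq]; exact List.suffix_cons _ u') (h3 p hp)) hnt hu'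
          rw [pvScan_cons_none hnone2]
          rw [ih t (by simpa using Nat.lt_succ_iff.mp (by simpa using hl))]
        · -- a key kj from tbl matches at the front
          have hmem : (kj, vj) ∈ tbl := List.mem_of_find?_eq_some hfm
          have hpj : kj <+: (c :: t) :=
            List.isPrefixOf_iff_prefix.mp (by simpa using List.find?_some hfm)
          have hkjne : kj ≠ [] := hne _ hmem
          have hdecomp : (c :: t) = kj ++ (c :: t).drop kj.length := List.prefix_append_drop hpj
          rw [pvScan_cons_some (by rw [hfm1]; exact hfm) (by simp) hkjne]
          rw [show pvCrep k v (c :: t) = kj ++ pvCrep k v ((c :: t).drop kj.length) from by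
            conv_lhs => rw [hdecomp]
            exact pvCrep_append v _ (h2 _ hmem)]
          have hfm2 : pvFirstMatch tbl (kj ++ pvCrep k v ((c :: t).drop kj.length)) = some (kj, vj) := by
            rw [pvFirstMatch]
            apply pvFind?_first _ _ _ hmem
              (by simp [List.isPrefixOf_iff_prefix])
            intro q hq hqpre
            rw [List.isPrefixOf_iff_prefix] at hqpre
            by_cases hql : q.1 = kj
            · exact (h56 q hq (kj, vj) hmem).2 hql
            · rcases List.prefix_or_prefix_of_prefix hqpre (List.prefix_append kj _) with h | h
              · exact absurd h ((h56 q hq (kj, vj) hmem).1 hql).1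
              · exact absurd h ((h56 (kj, vj) hmem q hq).1 (Ne.symm hql)).1
          rw [pvScan_cons_some hfm2 (by simp [hkjne]) hkjne]
          rw [List.drop_left]
          rw [ih ((c :: t).drop kj.length)
            (by have hk1 : 0 < kj.length := List.length_pos_iff.mpr hkjne
                simp only [List.length_drop, List.length_cons] at hl ⊢; omega)]

-- the full chain of A's six replace passes, on char lists
def pvChain (l : List Char) : List Char :=
  pvCrep "To Score in Both Halves".toList "Marcar em Ambas Etapas".toList
    (pvCrep "To Win Both Halves".toList "Ganhar Ambas Etapas".toList
      (pvCrep "To Win Either Half".toList "Ganhar Qualquer Etapa".toList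
        (pvCrep "To Win to Nil".toList "Ganhar sem tomar Gol".toList
          (pvCrep "Away".toList "Fora".toList
            (pvCrep "Home".toList "Casa".toList l)))))

theorem pvMain (l : List Char) : pvScan pvTableB l = pvChain l := by
  have s1 := pvStep "Home".toList "Casa".toList
    [("Away".toList, "Fora".toList),
     ("To Win to Nil".toList, "Ganhar sem tomar Gol".toList),
     ("To Win Either Half".toList, "Ganhar Qualquer Etapa".toList),
     ("To Win Both Halves".toList, "Ganhar Ambas Etapas".toList),
     ("To Score in Both Halves".toList, "Marcar em Ambas Etapas".toList)] (by decide)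
  have s2 := pvStep "Away".toList "Fora".toList
    [("To Win to Nil".toList, "Ganhar sem tomar Gol".toList),
     ("To Win Either Half".toList, "Ganhar Qualquer Etapa".toList),
     ("To Win Both Halves".toList, "Ganhar Ambas Etapas".toList),
     ("To Score in Both Halves".toList, "Marcar em Ambas Etapas".toList)] (by decide)
  have s3 := pvStep "To Win to Nil".toList "Ganhar sem tomar Gol".toList
    [("To Win Either Half".toList, "Ganhar Qualquer Etapa".toList),
     ("To Win Both Halves".toList, "Ganhar Ambas Etapas".toList),
     ("To Score in Both Halves".toList, "Marcar em Ambas Etapas".toList)] (by decide)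
  have s4 := pvStep "To Win Either Half".toList "Ganhar Qualquer Etapa".toList
    [("To Win Both Halves".toList, "Ganhar Ambas Etapas".toList),
     ("To Score in Both Halves".toList, "Marcar em Ambas Etapas".toList)] (by decide)
  have s5 := pvStep "To Win Both Halves".toList "Ganhar Ambas Etapas".toList
    [("To Score in Both Halves".toList, "Marcar em Ambas Etapas".toList)] (by decide)
  have s6 := pvStep "To Score in Both Halves".toList "Marcar em Ambas Etapas".toList [] (by decide)
  unfold pvTableB pvChain
  rw [s1, s2, s3, s4, s5, s6, pvScan_nil_tbl]

lemma pvGo_spec (k v : List Char) (hk : k ≠ []) :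
    ∀ (fuel : Nat) (l acc : List Char), l.length ≤ fuel →
      PySem.Chars.replace.go k v fuel l acc = acc.reverse ++ pvCrep k v l := by
  intro fuel
  induction fuel with
  | zero =>
    intro l acc hl
    have : l = [] := List.eq_nil_of_length_eq_zero (by omega)
    subst this
    simp [PySem.Chars.replace.go, pvCrep_nil]
  | succ f ih =>
    intro l acc hl
    cases l with
    | nil => simp [PySem.Chars.replace.go, pvCrep_nil]
    | cons c t =>
      by_cases hp : k.isPrefixOf (c :: t)
      · rw [show PySem.Chars.replace.go k v (f + 1) (c :: t) acc
            = PySem.Chars.replace.go k v f ((c :: t).drop k.length) (v.reverse ++ acc) from by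
          rw [PySem.Chars.replace.go]; simp [hp]]
        rw [ih _ _ (by have hk1 : 0 < k.length := List.length_pos_iff.mpr hk; simp only [List.length_drop, List.length_cons] at hl ⊢; omega)]
        rw [pvCrep_pos v hk (List.isPrefixOf_iff_prefix.mp hp)]
        simp
      · rw [show PySem.Chars.replace.go k v (f + 1) (c :: t) acc
            = PySem.Chars.replace.go k v f t (c :: acc) from by
          rw [PySem.Chars.replace.go]; simp [hp]]
        rw [ih _ _ (by simp only [List.length_cons] at hl; omega)]
        rw [pvCrep_neg v (fun hc => hp (List.isPrefixOf_iff_prefix.mpr hc))]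
        simp

lemma pvReplace_eq (k v l : List Char) (hk : k ≠ []) :
    PySem.Chars.replace l k v = pvCrep k v l := by
  rw [PySem.Chars.replace, if_neg (by simpa using hk)]
  simpa using pvGo_spec k v hk l.length l [] le_rfl

theorem pvASide (s : String) :
    get_translated_cotation_with_header_name_special s
      = String.ofList (pvChain (PySem.Chars.strip s.toList)) := by
  unfold get_translated_cotation_with_header_name_special
  rw [show pvTranslateTable.keys
      = ["Home", "Away", "To Win to Nil", "To Win Either Half", "To Win Both Halves",
         "To Score in Both Halves"] from by decide]
  simp only [List.foldl_cons, List.foldl_nil]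
  rw [show pvTranslateTable.getD "Home" "Home" = "Casa" from by decide,
      show pvTranslateTable.getD "Away" "Away" = "Fora" from by decide,
      show pvTranslateTable.getD "To Win to Nil" "To Win to Nil" = "Ganhar sem tomar Gol" from by decide,
      show pvTranslateTable.getD "To Win Either Half" "To Win Either Half" = "Ganhar Qualquer Etapa" from by decide,
      show pvTranslateTable.getD "To Win Both Halves" "To Win Both Halves" = "Ganhar Ambas Etapas" from by decide,
      show pvTranslateTable.getD "To Score in Both Halves" "To Score in Both Halves" = "Marcar em Ambas Etapas" from by decide]
  have hlist :
      (PySem.Str.replace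
        (PySem.Str.replace
          (PySem.Str.replace
            (PySem.Str.replace
              (PySem.Str.replace
                (PySem.Str.replace (PySem.Str.strip s) "Home" "Casa")
                "Away" "Fora")
              "To Win to Nil" "Ganhar sem tomar Gol")
            "To Win Either Half" "Ganhar Qualquer Etapa")
          "To Win Both Halves" "Ganhar Ambas Etapas")
        "To Score in Both Halves" "Marcar em Ambas Etapas").toList
      = pvChain (PySem.Chars.strip s.toList) := by
    simp only [pysem, PySem.Str.toList_replace, PySem.Str.toList_strip]
    unfold pvChain
    rw [pvReplace_eq _ _ _ (by decide), pvReplace_eq _ _ _ (by decide),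
        pvReplace_eq _ _ _ (by decide), pvReplace_eq _ _ _ (by decide),
        pvReplace_eq _ _ _ (by decide), pvReplace_eq _ _ _ (by decide)]
  rw [← hlist, String.ofList_toList]

-- ===== VERDICT (by name: the statement is the Claim_ definition above) =====
theorem get_translated_cotation_with_header_name_special_spec : Claim_equal_get_translated_cotation_with_header_name_special := by
  intro s _
  unfold Spec_get_translated_cotation_with_header_name_special
  rw [pvASide, get_translated_cotation_with_header_name_special_alt, pvMain]
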